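-- pv_equiv track=rewrite | github.com/Romzes/HappyLC | MainProject/Explore/Problems/02_Medium/00247_StrobogrammaticNumber_II.py | findStrobogrammatic
-- ===== SOURCE A (Python) =====
-- from typing import List
--
-- def findStrobogrammatic(n: int) -> List[str]:
--     res = []
--     dig_arr = ['0', '1', '8', '6', '9']
--     dig_cnt = len(dig_arr)
--     dig_map = {'0': '0', '1': '1', '8': '8', '6': '9', '9': '6'}
--     m, k = divmod(n, 2)
--     for k1 in range(3**k):
--         for i in range(int(dig_cnt**(m-1)), int(dig_cnt**m)):
--             seq = n*[0]
--             if k == 1: seq[m] = dig_arr[k1]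
--             d = i
--             for j in range(m-1, -1, -1):
--                 d, r = divmod(d, dig_cnt)
--                 seq[j] = dig_arr[r]
--                 seq[n-1-j] = dig_map[seq[j]]
--             res.append(''.join(seq))
--     return res
-- ===== SOURCE B (Python) =====
-- def findStrobogrammatic(n):
--     if n < 0:
--         return []
--     mid = [''] if n % 2 == 0 else ['0', '1', '8']
--     mirror = {'0': '0', '1': '1', '8': '8', '6': '9', '9': '6'}
--     halves = ['']
--     for j in range(n // 2):
--         digits = '1869' if j == 0 else '01869'
--         halves = [h + d for h in halves for d in digits]
--     return [h + c + ''.join(mirror[d] for d in reversed(h))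
--             for c in mid for h in halves]
-- ===== Notes on version B (the rewrite author's own statement) =====
-- stated objective: alternative
-- what changed: B builds the left halves by iterated cartesian-product extension (wrapping a growing prefix list) and mirrors each half with a reversed translation, instead of decoding every output string from a base-5 index with repeated divmod into a preallocated buffer.
import Mathlib
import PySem

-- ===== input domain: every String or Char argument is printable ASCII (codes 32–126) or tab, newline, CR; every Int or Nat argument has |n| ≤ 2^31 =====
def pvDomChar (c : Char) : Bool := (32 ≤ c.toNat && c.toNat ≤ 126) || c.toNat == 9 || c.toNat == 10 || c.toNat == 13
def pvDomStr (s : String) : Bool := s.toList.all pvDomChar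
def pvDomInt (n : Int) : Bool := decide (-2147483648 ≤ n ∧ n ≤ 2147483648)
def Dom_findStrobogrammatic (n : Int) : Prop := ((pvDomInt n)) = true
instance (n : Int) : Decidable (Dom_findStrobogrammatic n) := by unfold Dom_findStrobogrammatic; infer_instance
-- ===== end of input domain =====

-- B builds the left halves by iterated cartesian-product extension and mirrors them,
-- instead of A's base-5 index decoding with divmod into a preallocated buffer (objective: alternative).

-- ===== PORT A =====
-- Python list assignment seq[i] = c; every index A writes is in range 0 ≤ i < len (proved below), so no IndexError case arises.
def pvSetI (xs : List Char) (i : Int) (c : Char) : List Char := xs.set i.toNat c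

-- int(5**e) for an Int exponent: Python gives an exact int for e ≥ 0 and int(0.0<x<1.0) = 0 for e < 0.
def pvIntPow (b e : Int) : Int := if e < 0 then 0 else b ^ e.toNat

def pvDigArr : List Char := ['0', '1', '8', '6', '9']

def pvDigMap : PySem.Dict Char Char :=
  PySem.Dict.ofList [('0', '0'), ('1', '1'), ('8', '8'), ('6', '9'), ('9', '6')]

-- the inner 'for j in range(m-1, -1, -1)' loop of A (state: d and seq)
def pvALoop (n : Int) (js : List Int) (d : Int) (seq : List Char) : List Char :=
  match js with
  | [] => seq
  | j :: rest =>
      let d' := PySem.Int.floordiv d 5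
      let r := PySem.Int.mod d 5
      let c := (PySem.List.pyGet? pvDigArr r).getD '?'            -- dig_arr[r], always in range (0 ≤ r < 5)
      let seq1 := pvSetI seq j c
      let seq2 := pvSetI seq1 (n - 1 - j) ((pvDigMap.get? c).getD '?')   -- dig_map[seq[j]], key always present
      pvALoop n rest d' seq2

def findStrobogrammatic (n : Int) : List String :=
  let digArr := pvDigArr
  let digCnt : Int := (digArr.length : Int)
  let m := PySem.Int.floordiv n 2
  let k := PySem.Int.mod n 2
  (PySem.List.pyRange 0 (3 ^ k.toNat) 1).foldl (fun res k1 =>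
    (PySem.List.pyRange (pvIntPow digCnt (m - 1)) (pvIntPow digCnt m) 1).foldl (fun res i =>
      -- seq = n*[0]: a buffer of n cells; every cell of the joined result is overwritten before the join
      let seq0 : List Char := List.replicate n.toNat '?'
      let seq1 := if k = 1 then pvSetI seq0 m ((PySem.List.pyGet? digArr k1).getD '?') else seq0
      let seq := pvALoop n (PySem.List.pyRange (m - 1) (-1) (-1)) i seq1
      res ++ [String.ofList seq]) res) []

-- ===== PORT B =====
def pvMirrorB : PySem.Dict Char Char :=
  PySem.Dict.ofList [('0', '0'), ('1', '1'), ('8', '8'), ('6', '9'), ('9', '6')]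

-- Python strings are modelled as List Char (PySem.Chars convention); String.ofList joins at the end.
def findStrobogrammatic_alt (n : Int) : List String :=
  if n < 0 then []
  else
    let mid : List (List Char) :=
      if PySem.Int.mod n 2 = 0 then [[]] else [['0'], ['1'], ['8']]
    let halves := (PySem.List.pyRange 0 (PySem.Int.floordiv n 2) 1).foldl
      (fun hs j =>
        let digits : List Char := if j = 0 then ['1', '8', '6', '9'] else ['0', '1', '8', '6', '9']
        hs.flatMap (fun h => digits.map (fun d => h ++ [d])))
      [[]]
    mid.flatMap (fun c => halves.map (fun h =>
      String.ofList (h ++ c ++ h.reverse.map (fun d => (pvMirrorB.get? d).getD '?'))))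

-- ===== PRECONDITION & SPEC =====
def Spec_findStrobogrammatic (n : Int) (out : List String) : Prop := out = findStrobogrammatic_alt n
instance (n : Int) (out : List String) : Decidable (Spec_findStrobogrammatic n out) := by unfold Spec_findStrobogrammatic; infer_instance

-- ===== CLAIM (what is proved, stated in full; the proofs are below) =====
def Claim_equal_findStrobogrammatic : Prop := ∀ (n : Int), Dom_findStrobogrammatic n → Spec_findStrobogrammatic n (findStrobogrammatic n)

-- ===== LEMMAS AND PROOFS =====

-- pure model of a 'half': the t base-5 digits of d (most significant first), through the digit alphabet
def pvDig : Nat → Char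
  | 0 => '0' | 1 => '1' | 2 => '8' | 3 => '6' | 4 => '9' | _ => '?'

def pvMirF : Char → Char
  | '0' => '0' | '1' => '1' | '8' => '8' | '6' => '9' | '9' => '6' | _ => '?'

def pvHalf : Nat → Nat → List Char
  | 0, _ => []
  | t + 1, d => pvHalf t (d / 5) ++ [pvDig (d % 5)]

theorem pvDigArr_get (r : Nat) (h : r < 5) :
    (PySem.List.pyGet? pvDigArr (r : Int)).getD '?' = pvDig r := by
  interval_cases r <;> decide

theorem pvDigMap_get (r : Nat) :
    (pvDigMap.get? (pvDig r)).getD '?' = pvMirF (pvDig r) := by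
  rcases r with _|_|_|_|_|m
  · decide
  · decide
  · decide
  · decide
  · decide
  · change (pvDigMap.get? '?').getD '?' = pvMirF '?'
    decide

theorem pvMirrorB_get (r : Nat) :
    (pvMirrorB.get? (pvDig r)).getD '?' = pvMirF (pvDig r) := by
  rcases r with _|_|_|_|_|m
  · decide
  · decide
  · decide
  · decide
  · decide
  · change (pvMirrorB.get? '?').getD '?' = pvMirF '?'
    decide

-- the inner loop of A writes the base-5 digits of d into the first t cells and their mirror into the last t

-- B's wrap step and its enumeration
def pvWrap (hs : List (List Char)) : List (List Char) :=
  hs.flatMap (fun h => (['0', '1', '8', '6', '9'] : List Char).map (fun d => h ++ [d]))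

def pvGrow : Nat → List (List Char) → List (List Char)
  | 0, hs => hs
  | t + 1, hs => pvGrow t (pvWrap hs)

theorem pvHalf_succ5 (s a r : Nat) (h : r < 5) :
    pvHalf (s + 1) (5 * a + r) = pvHalf s a ++ [pvDig r] := by
  have h1 : (5 * a + r) / 5 = a := by omega
  have h2 : (5 * a + r) % 5 = r := by omega
  simp [pvHalf, h1, h2]

theorem pvHalf_mir' (t : Nat) : ∀ d : Nat,
    (pvHalf t d).map (fun c => (pvMirrorB.get? c).getD '?') = (pvHalf t d).map pvMirF := by
  induction t with
  | zero => intro d; simp [pvHalf]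
  | succ t ih => intro d; simp [pvHalf, ih, pvMirrorB_get]

theorem pvWrap_range'' (s : Nat) : ∀ (c a : Nat),
    pvWrap ((List.range' a c).map (pvHalf s)) = (List.range' (5 * a) (5 * c)).map (pvHalf (s + 1)) := by
  intro c
  induction c with
  | zero => intro a; simp [pvWrap]
  | succ c ih =>
    intro a
    have hcons : ∀ (h : List Char) (hs : List (List Char)),
        pvWrap (h :: hs) = ((['0','1','8','6','9'] : List Char).map (fun d => h ++ [d])) ++ pvWrap hs := by
      intro h hs; simp [pvWrap]
    have hsplit : List.range' (5 * a) (5 * (c + 1)) = List.range' (5 * a) 5 ++ List.range' (5 * a + 5) (5 * c) := by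
      rw [show 5 * (c + 1) = 5 + 5 * c by ring]
      rw [show (5:Nat) * a + 5 = 5 * a + 1 * 5 by ring, ← List.range'_append]
    have e5 : List.range' (5 * a) 5 = [5*a+0, 5*a+1, 5*a+2, 5*a+3, 5*a+4] := by
      simp [List.range'_succ]
    rw [List.range'_succ, List.map_cons, hcons, ih (a+1), hsplit, e5]
    simp only [List.map_append, List.map_cons, List.map_nil]
    rw [pvHalf_succ5 s a 0 (by omega), pvHalf_succ5 s a 1 (by omega), pvHalf_succ5 s a 2 (by omega),
        pvHalf_succ5 s a 3 (by omega), pvHalf_succ5 s a 4 (by omega)]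
    simp [pvDig]
    rw [show 5*a+0+5 = 5*(a+1) by ring]
theorem pvGrow_range'2 (t : Nat) : ∀ (s a c : Nat),
    pvGrow t ((List.range' a c).map (pvHalf s)) = (List.range' (5 ^ t * a) (5 ^ t * c)).map (pvHalf (s + t)) := by
  induction t with
  | zero => intro s a c; simp [pvGrow]
  | succ t ih =>
    intro s a c
    show pvGrow t (pvWrap ((List.range' a c).map (pvHalf s))) = _
    rw [pvWrap_range'', ih (s+1) (5*a) (5*c)]
    rw [show 5 ^ (t+1) * a = 5 ^ t * (5 * a) by ring, show 5 ^ (t+1) * c = 5 ^ t * (5 * c) by ring,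
        show s + (t+1) = s + 1 + t by ring]

theorem pvFold_const (l : List Int) : ∀ (hs : List (List Char)),
    l.foldl (fun hs _ => pvWrap hs) hs = pvGrow l.length hs := by
  induction l with
  | nil => intro hs; simp [pvGrow]
  | cons x xs ih =>
    intro hs
    rw [List.foldl_cons, ih, List.length_cons]
    rfl

theorem pvRange_cast : ∀ (c a : Nat),
    PySem.List.pyRange (a : Int) ((a + c : Nat) : Int) 1 = (List.range' a c).map Int.ofNat := by
  intro c
  induction c with
  | zero => intro a; simp [PySem.List.pyRange_one_eq_nil]
  | succ c ih =>
    intro a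
    rw [PySem.List.pyRange_one_cons (by push_cast; omega), List.range'_succ, List.map_cons]
    have := ih (a + 1)
    rw [show ((a:Int) + 1) = ((a + 1 : Nat) : Int) by push_cast; ring,
        show ((a + (c+1) : Nat) : Int) = ((a + 1 + c : Nat) : Int) by push_cast; ring, this]
    rfl
theorem pvALoop_spec2 (t : Nat) : ∀ (d : Nat) (u v w : List Char),
    u.length = t → w.length = t →
    pvALoop ((2 * t + v.length : Nat) : Int) (PySem.List.pyRange ((t : Int) - 1) (-1) (-1)) (d : Int) (u ++ v ++ w)
      = pvHalf t d ++ v ++ (pvHalf t d).reverse.map pvMirF := by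
  induction t with
  | zero =>
    intro d u v w hu hw
    rw [List.length_eq_zero_iff] at hu hw
    subst hu; subst hw
    rw [PySem.List.pyRange_neg_one_eq_nil (by omega)]
    simp [pvALoop, pvHalf]
  | succ t ih =>
    intro d u v w hu hw
    -- decompose u = u' ++ [x], w = y :: w'
    rcases List.eq_nil_or_concat u with hnil | ⟨u', x, hux⟩
    · subst hnil; simp at hu
    rcases w with _ | ⟨y, w'⟩
    · simp at hw
    subst hux
    rw [List.concat_eq_append] at hu ⊢
    have hu' : u'.length = t := by simp at hu; omega
    have hw' : w'.length = t := by simp at hw; omega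
    have hcast : ((t:Nat) + 1 : Int) - 1 = ((t:Nat) : Int) := by ring
    rw [show (((t+1:Nat)) : Int) = ((t:Nat) : Int) + 1 by push_cast; ring, hcast,
        PySem.List.pyRange_neg_one_cons (by omega)]
    simp only [pvALoop]
    have hdiv : PySem.Int.floordiv (d:Int) 5 = ((d/5 : Nat) : Int) := by
      exact_mod_cast PySem.Int.floordiv_natCast d 5
    have hmod : PySem.Int.mod (d:Int) 5 = ((d%5 : Nat) : Int) := by
      exact_mod_cast PySem.Int.mod_natCast d 5
    have hm5 : d % 5 < 5 := Nat.mod_lt d (by omega)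
    have hc : (PySem.List.pyGet? pvDigArr ((d%5 : Nat) : Int)).getD '?' = pvDig (d%5) :=
      pvDigArr_get (d%5) hm5
    rw [hdiv, hmod, hc]
    -- first write: position t (last cell of u' ++ [x])
    have hset1 : pvSetI ((u' ++ [x]) ++ v ++ (y :: w')) ((t:Nat) : Int) (pvDig (d%5))
        = u' ++ (pvDig (d%5) :: (v ++ y :: w')) := by
      unfold pvSetI
      rw [Int.toNat_natCast]
      rw [List.append_assoc, List.append_assoc, List.set_append]
      simp [hu']
    rw [hset1]
    -- second write: position n-1-t = t+1+v.length (head of y :: w')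
    have hset2 : pvSetI (u' ++ (pvDig (d%5) :: (v ++ y :: w')))
          (((2 * (t+1) + v.length : Nat) : Int) - 1 - ((t:Nat) : Int))
          ((pvDigMap.get? (pvDig (d%5))).getD '?')
        = (u' ++ (pvDig (d%5) :: v)) ++ (pvMirF (pvDig (d%5)) :: w') := by
      unfold pvSetI
      rw [pvDigMap_get]
      have hidx : ((((2 * (t+1) + v.length : Nat) : Int) - 1 - ((t:Nat) : Int))).toNat
          = t + 1 + v.length := by push_cast; omega
      rw [hidx]
      rw [show u' ++ (pvDig (d%5) :: (v ++ y :: w')) = (u' ++ (pvDig (d%5) :: v)) ++ (y :: w') by simp]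
      rw [List.set_append]
      simp [hu']
      rw [if_neg (by omega), show t + 1 + v.length - (t + (v.length + 1)) = 0 by omega]
      simp
    rw [hset2]
    -- recursive call via ih
    have hn : ((2 * (t+1) + v.length : Nat) : Int) = ((2 * t + (pvDig (d%5) :: v ++ [pvMirF (pvDig (d%5))]).length : Nat) : Int) := by
      simp
      ring
    have harg : (u' ++ (pvDig (d%5) :: v)) ++ (pvMirF (pvDig (d%5)) :: w')
        = u' ++ (pvDig (d%5) :: v ++ [pvMirF (pvDig (d%5))]) ++ w' := by
      simp
    rw [hn, harg, ih (d/5) u' (pvDig (d%5) :: v ++ [pvMirF (pvDig (d%5))]) w' hu' hw']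
    show pvHalf t (d/5) ++ (pvDig (d % 5) :: v ++ [pvMirF (pvDig (d % 5))]) ++ _ = _
    simp [pvHalf, List.reverse_append]
theorem pvSide (t : Nat) (ht : 1 ≤ t) (v : List Char) :
    (PySem.List.pyRange (((5^(t-1) : Nat)) : Int) (((5^t : Nat)) : Int) 1).map
       (fun i => String.ofList (pvALoop ((2*t + v.length : Nat) : Int)
          (PySem.List.pyRange ((t : Int) - 1) (-1) (-1)) i
          (List.replicate t '?' ++ v ++ List.replicate t '?')))
    = ((List.range' (5^(t-1)) (4*5^(t-1))).map (pvHalf t)).map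
        (fun h => String.ofList (h ++ v ++ h.reverse.map (fun d => (pvMirrorB.get? d).getD '?'))) := by
  have hpow : (5^t : Nat) = 5^(t-1) + 4*5^(t-1) := by
    rcases t with _ | t
    · omega
    · simp [pow_succ]; ring
  rw [hpow, pvRange_cast, List.map_map, List.map_map]
  apply List.map_congr_left
  intro q hq
  show String.ofList (pvALoop _ _ ((q : Nat) : Int) _) = _
  rw [show ((t:Int)) = ((t:Nat):Int) by rfl] at *
  rw [pvALoop_spec2 t q (List.replicate t '?') v (List.replicate t '?') (by simp) (by simp)]
  simp only [Function.comp]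
  rw [List.map_reverse, List.map_reverse, pvHalf_mir']
theorem pvHalves (t : Nat) (ht : 1 ≤ t) :
    (PySem.List.pyRange 0 ((t : Nat) : Int) 1).foldl
      (fun hs j =>
        let digits : List Char := if j = 0 then ['1', '8', '6', '9'] else ['0', '1', '8', '6', '9']
        hs.flatMap (fun h => digits.map (fun d => h ++ [d]))) [[]]
    = (List.range' (5^(t-1)) (4*5^(t-1))).map (pvHalf t) := by
  rw [PySem.List.pyRange_one_cons (by exact_mod_cast ht), List.foldl_cons]
  have hseed : (([[]] : List (List Char)).flatMap
      (fun h => (if (0:Int) = 0 then (['1','8','6','9'] : List Char) else ['0','1','8','6','9']).map (fun d => h ++ [d])))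
      = [['1'],['8'],['6'],['9']] := by decide
  have hcongr : (PySem.List.pyRange (0+1) ((t : Nat) : Int) 1).foldl
      (fun hs j =>
        let digits : List Char := if j = 0 then ['1', '8', '6', '9'] else ['0', '1', '8', '6', '9']
        hs.flatMap (fun h => digits.map (fun d => h ++ [d]))) [['1'],['8'],['6'],['9']]
      = (PySem.List.pyRange (0+1) ((t : Nat) : Int) 1).foldl (fun hs _ => pvWrap hs) [['1'],['8'],['6'],['9']] := by
    apply PySem.List.foldl_congr_mem
    intro acc x hx
    have hb := (PySem.List.mem_pyRange_one).1 hx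
    simp only [if_neg (by omega : ¬ x = 0)]
    rfl
  show (PySem.List.pyRange (0+1) ((t : Nat) : Int) 1).foldl _ (([[]] : List (List Char)).flatMap _) = _
  rw [hseed, hcongr, pvFold_const]
  rw [PySem.List.length_pyRange_one]
  have hlen : (((t : Nat) : Int) - (0+1)).toNat = t - 1 := by omega
  rw [hlen]
  have hseed2 : ([['1'],['8'],['6'],['9']] : List (List Char)) = (List.range' 1 4).map (pvHalf 1) := by decide
  rw [hseed2, pvGrow_range'2 (t-1) 1 1 4]
  rw [show 5^(t-1)*1 = 5^(t-1) by ring, show 5^(t-1)*4 = 4*5^(t-1) by ring,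
      show 1 + (t-1) = t by omega]
theorem pvSetMid (t : Nat) (c : Char) :
    pvSetI (List.replicate (2*t+1) '?') ((t : Nat) : Int) c
      = List.replicate t '?' ++ [c] ++ List.replicate t '?' := by
  unfold pvSetI
  rw [Int.toNat_natCast]
  rw [show 2*t+1 = t + (t+1) by omega, List.replicate_add, List.replicate_succ, List.set_append]
  simp

theorem pvMain (n : Int) : findStrobogrammatic n = findStrobogrammatic_alt n := by
  have h2 : (0:Int) < 2 := by omega
  have hk0 := PySem.Int.mod_nonneg n h2
  have hk2 := PySem.Int.mod_lt n h2
  have hmk := PySem.Int.floordiv_mul_add_mod n 2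
  by_cases hneg : n < 0
  · have hm : PySem.Int.floordiv n 2 < 0 := by omega
    simp only [findStrobogrammatic, findStrobogrammatic_alt, if_pos hneg]
    rw [show pvIntPow ((pvDigArr.length : Nat) : Int) (PySem.Int.floordiv n 2) = 0 from by
      unfold pvIntPow; rw [if_pos hm]]
    rw [PySem.List.pyRange_one_eq_nil (by
      unfold pvIntPow
      rw [if_pos (by omega)])]
    simp [List.foldl_fixed]
  · have hm0 : 0 ≤ PySem.Int.floordiv n 2 := by omega
    set m := PySem.Int.floordiv n 2 with hmdef
    set k := PySem.Int.mod n 2 with hkdef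
    have hmt : m = ((m.toNat : Nat) : Int) := by omega
    set t := m.toNat with htdef
    rcases Nat.eq_zero_or_pos t with ht0 | ht1
    · -- n = 0 or n = 1
      have : n = 0 ∨ n = 1 := by omega
      rcases this with h | h <;> subst h <;> decide
    · -- t ≥ 1
      have hlo : pvIntPow ((pvDigArr.length : Nat) : Int) (m - 1) = ((5^(t-1) : Nat) : Int) := by
        unfold pvIntPow
        rw [if_neg (by omega)]
        have : (m - 1).toNat = t - 1 := by omega
        rw [this, show ((pvDigArr.length : Nat) : Int) = (5 : Int) from rfl]
        push_cast
        ring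
      have hhi : pvIntPow ((pvDigArr.length : Nat) : Int) m = ((5^t : Nat) : Int) := by
        unfold pvIntPow
        rw [if_neg (by omega)]
        rw [show ((pvDigArr.length : Nat) : Int) = (5 : Int) from rfl]
        push_cast
        ring
      simp only [findStrobogrammatic, findStrobogrammatic_alt, if_neg (by omega : ¬ n < 0),
        ← hmdef, ← hkdef, hlo, hhi,
        PySem.List.foldl_append_singleton_eq_map, PySem.List.foldl_append_eq_flatMap,
        List.nil_append]
      rcases (show k = 0 ∨ k = 1 by omega) with hk | hk
      · -- even
        rw [hk]
        have hn2t : n.toNat = 2*t := by omega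
        rw [show (3:Int) ^ ((0:Int)).toNat = 1 from rfl]
        rw [show PySem.List.pyRange 0 1 1 = [0] from by decide]
        simp only [List.flatMap_cons, List.flatMap_nil, List.append_nil,
          if_neg (show ¬ (0:Int) = 1 by omega), hn2t]
        rw [show (if True then ([[]] : List (List Char)) else [['0'], ['1'], ['8']]) = [[]] from rfl]
        simp only [List.flatMap_cons, List.flatMap_nil, List.append_nil]
        rw [hmt, pvHalves t ht1]
        rw [show n = ((2*t + ([] : List Char).length : Nat) : Int) by simp; omega]
        rw [show List.replicate (2*t) '?' = List.replicate t '?' ++ [] ++ List.replicate t '?' by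
          rw [two_mul, List.replicate_add]; simp]
        simpa using pvSide t ht1 []
      · -- odd
        rw [hk]
        have hn2t : n.toNat = 2*t+1 := by omega
        rw [show (3:Int) ^ ((1:Int)).toNat = 3 from rfl]
        rw [show PySem.List.pyRange 0 3 1 = [0, 1, 2] from by decide]
        simp only [List.flatMap_cons, List.flatMap_nil, List.append_nil,
          if_neg (show ¬ (1:Int) = 0 by omega), hn2t]
        rw [show (PySem.List.pyGet? pvDigArr 0).getD '?' = '0' from by decide,
            show (PySem.List.pyGet? pvDigArr 1).getD '?' = '1' from by decide,
            show (PySem.List.pyGet? pvDigArr 2).getD '?' = '8' from by decide]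
        rw [hmt, pvHalves t ht1, pvSetMid t '0', pvSetMid t '1', pvSetMid t '8']
        simp only [if_true]
        rw [show n = ((2*t + (['0'] : List Char).length : Nat) : Int) by simp; omega]
        rw [pvSide t ht1 ['0']]
        rw [show ((2*t + (['0'] : List Char).length : Nat) : Int) = ((2*t + (['1'] : List Char).length : Nat) : Int) from rfl]
        rw [pvSide t ht1 ['1']]
        rw [show ((2*t + (['1'] : List Char).length : Nat) : Int) = ((2*t + (['8'] : List Char).length : Nat) : Int) from rfl]
        rw [pvSide t ht1 ['8']]

-- ===== VERDICT (by name: the statement is the Claim_ definition above) =====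
theorem findStrobogrammatic_spec : Claim_equal_findStrobogrammatic := by
  intro n _
  exact pvMain n
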